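-- pv_equiv track=rewrite | github.com/oscargarciatec/Proyecto_Integrador | src/compass/ingestion/chunking/text_utils.py | normalize_section_title
-- ===== SOURCE A (Python) =====
-- def normalize_section_title(title: str) -> str:
--     """Normaliza el título de una sección extrayendo palabras en mayúsculas."""
--     title = (title or "").strip()
--     if not title:
--         return ""
--     words = title.split()
--     prefix = []
--     for w in words:
--         if w.isupper() and len(w) > 1:
--             prefix.append(w)
--         elif prefix:
--             break
--     return " ".join(prefix) if prefix else title
-- ===== SOURCE B (Python) =====
-- def normalize_section_title(title: str) -> str:
--     """Two declarative phases: skip leading non-qualifying words, then take the run."""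
--     title = (title or "").strip()
--     if not title:
--         return ""
--
--     def qual(w):
--         return w.isupper() and len(w) > 1
--
--     rest = title.split()
--     while rest and not qual(rest[0]):
--         rest = rest[1:]
--     run = []
--     while rest and qual(rest[0]):
--         run.append(rest[0])
--         rest = rest[1:]
--     return " ".join(run) if run else title
-- ===== Notes on version B (the rewrite author's own statement) =====
-- stated objective: alternative
-- what changed: Replaces A's single stateful accumulate-or-break loop over the words with two separate declarative phases: a drop phase that skips leading non-qualifying words, then a take phase that collects the maximal run of qualifying words.
import Mathlib
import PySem

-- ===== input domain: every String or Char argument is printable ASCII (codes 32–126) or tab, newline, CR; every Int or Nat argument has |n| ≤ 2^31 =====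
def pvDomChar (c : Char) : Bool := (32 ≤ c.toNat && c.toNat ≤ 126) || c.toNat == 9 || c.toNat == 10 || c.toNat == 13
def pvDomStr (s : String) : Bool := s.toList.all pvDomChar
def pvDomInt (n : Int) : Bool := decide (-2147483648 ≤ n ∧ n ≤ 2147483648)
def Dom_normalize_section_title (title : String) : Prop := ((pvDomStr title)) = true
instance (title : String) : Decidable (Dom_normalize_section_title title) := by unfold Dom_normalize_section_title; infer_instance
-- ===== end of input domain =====

-- B collects the prefix in two declarative phases (drop leading non-qualifying words, then take the
-- qualifying run) instead of A's single accumulate-or-break loop; same result, same cost (alternative).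

-- w.isupper(): at least one cased char and no lowercase char — exact on the ASCII domain
def pvIsupper (cs : List Char) : Bool :=
  cs.any (fun c => PySem.Chars.isalpha c) && cs.all (fun c => !PySem.Chars.islower c)

-- w.isupper() and len(w) > 1
def pvQual (w : List Char) : Bool := pvIsupper w && decide (w.length > 1)

-- ===== PORT A =====
-- the 'for w in words' loop with accumulator 'prefix' and break
def pvALoop : List (List Char) → List (List Char) → List (List Char)
  | [], pre => pre
  | w :: ws, pre =>
    if pvQual w then pvALoop ws (pre ++ [w])
    else if pre ≠ [] then pre
    else pvALoop ws pre

def normalize_section_title (title : String) : String :=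
  let t := PySem.Chars.strip ((if title = "" then "" else title).toList)
  if t = [] then ""
  else
    let words := PySem.Chars.split₀ t
    let pre := pvALoop words []
    if pre ≠ [] then String.ofList (PySem.Chars.join [' '] pre) else String.ofList t

-- ===== PORT B =====
-- first while loop: skip leading non-qualifying words
def pvBDrop : List (List Char) → List (List Char)
  | [] => []
  | w :: ws => if !pvQual w then pvBDrop ws else w :: ws

-- second while loop: collect the run of qualifying words
def pvBTake : List (List Char) → List (List Char)
  | [] => []
  | w :: ws => if pvQual w then w :: pvBTake ws else []

def normalize_section_title_alt (title : String) : String :=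
  let t := PySem.Chars.strip ((if title = "" then "" else title).toList)
  if t = [] then ""
  else
    let words := PySem.Chars.split₀ t
    let run := pvBTake (pvBDrop words)
    if run ≠ [] then String.ofList (PySem.Chars.join [' '] run) else String.ofList t

-- ===== PRECONDITION & SPEC =====
def Spec_normalize_section_title (title : String) (out : String) : Prop := out = normalize_section_title_alt title
instance (title : String) (out : String) : Decidable (Spec_normalize_section_title title out) := by unfold Spec_normalize_section_title; infer_instance

-- ===== CLAIM (what is proved, stated in full; the proofs are below) =====
def Claim_equal_normalize_section_title : Prop := ∀ (title : String), Dom_normalize_section_title title → Spec_normalize_section_title title (normalize_section_title title)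

-- ===== LEMMAS AND PROOFS =====

-- once the prefix is nonempty, A keeps taking qualifying words and stops at the first other word
theorem pvALoop_ne_nil (ws : List (List Char)) : ∀ pre : List (List Char), pre ≠ [] →
    pvALoop ws pre = pre ++ pvBTake ws := by
  induction ws with
  | nil => intro pre _; simp [pvALoop, pvBTake]
  | cons w ws ih =>
    intro pre hpre
    by_cases hq : pvQual w
    · rw [pvALoop, if_pos hq, ih (pre ++ [w]) (by simp), pvBTake, if_pos hq]
      simp
    · rw [pvALoop, if_neg hq, if_pos hpre, pvBTake, if_neg hq, List.append_nil]

-- with an empty prefix, A skips non-qualifying words, i.e. performs B's drop phase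
theorem pvALoop_nil (ws : List (List Char)) : pvALoop ws [] = pvBTake (pvBDrop ws) := by
  induction ws with
  | nil => rfl
  | cons w ws ih =>
    by_cases hq : pvQual w
    · rw [pvALoop, if_pos hq, List.nil_append,
        pvALoop_ne_nil ws [w] (by simp), pvBDrop, if_neg (by simp [hq]), pvBTake, if_pos hq]
      rfl
    · rw [pvALoop, if_neg hq, if_neg (by simp), ih, pvBDrop, if_pos (by simp [hq])]

-- ===== VERDICT (by name: the statement is the Claim_ definition above) =====
theorem normalize_section_title_spec : Claim_equal_normalize_section_title := by
  intro title _
  unfold Spec_normalize_section_title normalize_section_title normalize_section_title_alt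
  simp only [pvALoop_nil]
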